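-- pv_equiv track=rewrite | github.com/vigneshvn2146/chat_engine_uat_latest | old_files/vespa_client.py | _fill_missing_page_numbers
-- ===== SOURCE A (Python) =====
-- from typing import Dict, List, Optional, Tuple, Any
--
-- def _fill_missing_page_numbers(page_list: List[str], gap_threshold: int = 5) -> List[str]:
--     """
--     Given a list of page numbers (strings), detect local clusters and fill missing pages
--     within each cluster. Returns a sorted list of filled page numbers as strings.
--     """
--     try:
--         nums = sorted(set(int(p) for p in page_list if str(p).isdigit()))
--     except Exception:
--         return []
--
--     if not nums:
--         return []
--
--     clusters = []
--     current = [nums[0]]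
--     for n in nums[1:]:
--         if n - current[-1] <= gap_threshold:
--             current.append(n)
--         else:
--             clusters.append(current)
--             current = [n]
--     clusters.append(current)
--
--     filled = []
--     for c in clusters:
--         filled.extend(range(min(c), max(c) + 1))
--
--     return [str(x) for x in sorted(set(filled))]
-- ===== SOURCE B (Python) =====
-- from typing import List
--
-- def _fill_missing_page_numbers(page_list: List[str], gap_threshold: int = 5) -> List[str]:
--     """Single streaming pass: emit each page and, when the gap to the previous
--     page is within the threshold, the missing pages in between."""
--     try:
--         nums = sorted(set(int(p) for p in page_list if str(p).isdigit()))
--     except Exception: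
--         return []
--
--     if not nums:
--         return []
--
--     result = [nums[0]]
--     prev = nums[0]
--     for n in nums[1:]:
--         if n - prev <= gap_threshold:
--             result.extend(range(prev + 1, n + 1))
--         else:
--             result.append(n)
--         prev = n
--     return [str(x) for x in result]
-- ===== Notes on version B (the rewrite author's own statement) =====
-- stated objective: simpler
-- what changed: Replaces the three-phase pipeline (build explicit clusters, re-fill each cluster min..max, then sorted(set(...)) again) by one streaming pass over the sorted unique pages that emits each page plus the in-threshold gap fill directly, already sorted and duplicate-free.
import Mathlib
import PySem

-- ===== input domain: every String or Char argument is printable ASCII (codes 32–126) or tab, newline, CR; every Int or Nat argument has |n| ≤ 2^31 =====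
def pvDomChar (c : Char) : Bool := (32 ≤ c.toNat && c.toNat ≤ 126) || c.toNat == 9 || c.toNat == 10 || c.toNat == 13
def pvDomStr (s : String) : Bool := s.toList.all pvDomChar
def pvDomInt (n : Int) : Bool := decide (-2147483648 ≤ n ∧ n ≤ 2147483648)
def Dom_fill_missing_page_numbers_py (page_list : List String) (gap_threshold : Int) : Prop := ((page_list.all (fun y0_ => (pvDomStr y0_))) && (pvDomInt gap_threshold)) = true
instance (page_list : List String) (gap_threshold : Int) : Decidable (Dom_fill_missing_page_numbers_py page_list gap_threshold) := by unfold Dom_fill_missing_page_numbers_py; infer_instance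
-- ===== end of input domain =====

-- B replaces A's three phases (explicit clusters, per-cluster min..max refill, final
-- sorted(set(...))) by one streaming gap-filling pass over the sorted unique pages (simpler).

-- ===== PORT A =====
-- the try/except around the parse is ported as a check that every int(p) succeeds
-- (within Dom every digit-only string parses, so the except branch is unreachable there)
def fill_missing_page_numbers_py (page_list : List String) (gap_threshold : Int) : List String :=
  let parsed := (page_list.filter (fun p => PySem.Str.strIsdigit p)).map (fun p => PySem.Int.ofStr? p)
  if parsed.all Option.isSome then
    let nums := PySem.List.sorted (PySem.Set.ofList parsed.reduceOption) (fun x => x) false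
    if nums = [] then []
    else
      let st := nums.tail.foldl (fun (st : List (List Int) × List Int) n =>
          if n - PySem.List.pyGetD st.2 (-1) 0 ≤ gap_threshold then (st.1, st.2 ++ [n])
          else (st.1 ++ [st.2], [n])) ([], [nums.headI])
      let clusters := st.1 ++ [st.2]
      -- min(c)/max(c): c is always nonempty, so the total .getD 0 form is exact
      let filled := clusters.foldl (fun acc c =>
          acc ++ PySem.List.pyRange ((PySem.List.min? c (fun y => y)).getD 0)
                  ((PySem.List.max? c (fun y => y)).getD 0 + 1) 1) []
      (PySem.List.sorted (PySem.Set.ofList filled) (fun x => x) false).map PySem.Int.toStr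
  else []

-- ===== PORT B =====
def fill_missing_page_numbers_py_alt (page_list : List String) (gap_threshold : Int) : List String :=
  let parsed := (page_list.filter (fun p => PySem.Str.strIsdigit p)).map (fun p => PySem.Int.ofStr? p)
  if parsed.all Option.isSome then
    let nums := PySem.List.sorted (PySem.Set.ofList parsed.reduceOption) (fun x => x) false
    if nums = [] then []
    else
      let st := nums.tail.foldl (fun (st : List Int × Int) n =>
          if n - st.2 ≤ gap_threshold then (st.1 ++ PySem.List.pyRange (st.2 + 1) (n + 1) 1, n)
          else (st.1 ++ [n], n)) ([nums.headI], nums.headI)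
      st.1.map PySem.Int.toStr
  else []

-- ===== PRECONDITION & SPEC =====
def Spec_fill_missing_page_numbers_py (page_list : List String) (gap_threshold : Int) (out : List String) : Prop := out = fill_missing_page_numbers_py_alt page_list gap_threshold
instance (page_list : List String) (gap_threshold : Int) (out : List String) : Decidable (Spec_fill_missing_page_numbers_py page_list gap_threshold out) := by unfold Spec_fill_missing_page_numbers_py; infer_instance

-- ===== CLAIM (what is proved, stated in full; the proofs are below) =====
def Claim_equal_fill_missing_page_numbers_py : Prop := ∀ (page_list : List String) (gap_threshold : Int), Dom_fill_missing_page_numbers_py page_list gap_threshold → Spec_fill_missing_page_numbers_py page_list gap_threshold (fill_missing_page_numbers_py page_list gap_threshold)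

-- ===== LEMMAS AND PROOFS =====

-- what A's fill loop appends for one cluster
def pvFill (c : List Int) : List Int :=
  PySem.List.pyRange ((PySem.List.min? c (fun y => y)).getD 0)
    ((PySem.List.max? c (fun y => y)).getD 0 + 1) 1

lemma pvGetLast_append (l : List Int) (n : Int) : PySem.List.pyGetD (l ++ [n]) (-1) 0 = n := by
  simp [PySem.List.pyGetD, PySem.List.pyGet?, PySem.List.pyIdx?]

lemma pvMin_append (l : List Int) (m n : Int) (hm : PySem.List.min? l (fun y => y) = some m)
    (h : m < n) : PySem.List.min? (l ++ [n]) (fun y => y) = some m := by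
  cases l with
  | nil => simp [PySem.List.min?] at hm
  | cons x t =>
    rw [PySem.List.min?_id_cons] at hm
    rw [List.cons_append, PySem.List.min?_id_cons, List.foldl_append]
    simp at hm ⊢
    omega

lemma pvMax_append (l : List Int) (M n : Int) (hM : PySem.List.max? l (fun y => y) = some M)
    (h : M < n) : PySem.List.max? (l ++ [n]) (fun y => y) = some n := by
  cases l with
  | nil => simp [PySem.List.max?] at hM
  | cons x t =>
    rw [PySem.List.max?_id_cons] at hM
    rw [List.cons_append, PySem.List.max?_id_cons, List.foldl_append]
    simp at hM ⊢
    omega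

-- the heart: A's cluster loop and B's streaming loop stay in lockstep
lemma pvLoop_eq (gap : Int) :
    ∀ (rest : List Int) (clusters : List (List Int)) (current res : List Int) (prev cm : Int),
    (prev :: rest).Pairwise (· < ·) →
    PySem.List.pyGetD current (-1) 0 = prev →
    PySem.List.min? current (fun y => y) = some cm →
    PySem.List.max? current (fun y => y) = some prev →
    cm ≤ prev →
    res = (clusters.flatMap pvFill) ++ PySem.List.pyRange cm (prev + 1) 1 →
    res.Pairwise (· < ·) →
    (∀ y ∈ res, y ≤ prev) →
    (let stA := rest.foldl (fun (st : List (List Int) × List Int) n =>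
        if n - PySem.List.pyGetD st.2 (-1) 0 ≤ gap then (st.1, st.2 ++ [n])
        else (st.1 ++ [st.2], [n])) (clusters, current)
     let stB := rest.foldl (fun (st : List Int × Int) n =>
        if n - st.2 ≤ gap then (st.1 ++ PySem.List.pyRange (st.2 + 1) (n + 1) 1, n)
        else (st.1 ++ [n], n)) (res, prev)
     (stA.1 ++ [stA.2]).flatMap pvFill = stB.1 ∧ stB.1.Pairwise (· < ·)) := by
  intro rest
  induction rest with
  | nil =>
    intro clusters current res prev cm _ _ hmin hmax _ hres hpw _
    refine ⟨?_, by simpa [hres] using hpw⟩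
    simp [List.flatMap_append, hres, pvFill, hmin, hmax]
  | cons n rest' ih =>
    intro clusters current res prev cm hsort hlast hmin hmax hcm hres hpw hub
    have hprevn : prev < n := (List.pairwise_cons.1 hsort).1 n (by simp)
    have hsort' : (n :: rest').Pairwise (· < ·) := by
      have h := (List.pairwise_cons.1 hsort)
      exact List.pairwise_cons.2 ⟨fun y hy => (List.pairwise_cons.1 h.2).1 y hy,
        (List.pairwise_cons.1 h.2).2⟩
    simp only [List.foldl_cons, hlast]
    by_cases hgap : n - prev ≤ gap
    · rw [if_pos hgap, if_pos hgap]
      apply ih clusters (current ++ [n]) (res ++ PySem.List.pyRange (prev + 1) (n + 1) 1) n cm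
        hsort' (pvGetLast_append _ _) (pvMin_append _ _ _ hmin (by omega))
        (pvMax_append _ _ _ hmax hprevn) (by omega)
      · rw [hres, List.append_assoc,
          ← PySem.List.pyRange_one_append cm (prev + 1) (n + 1) (by omega) (by omega)]
      · rw [List.pairwise_append]
        refine ⟨hpw, PySem.List.pairwise_lt_pyRange_one _ _, fun y hy z hz => ?_⟩
        have := hub y hy
        have := (PySem.List.mem_pyRange_one.1 hz).1
        omega
      · intro y hy
        rcases List.mem_append.1 hy with hy | hy
        · have := hub y hy; omega
        · have := (PySem.List.mem_pyRange_one.1 hy).2; omega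
    · rw [if_neg hgap, if_neg hgap]
      apply ih (clusters ++ [current]) [n] (res ++ [n]) n n hsort'
        (pvGetLast_append [] n) (by simp [PySem.List.min?])
        (by simp [PySem.List.max?]) le_rfl
      · rw [List.flatMap_append, PySem.List.pyRange_one_singleton, hres]
        simp [pvFill, hmin, hmax]
      · rw [List.pairwise_append]
        refine ⟨hpw, by simp, fun y hy z hz => ?_⟩
        have := hub y hy
        simp at hz
        omega
      · intro y hy
        rcases List.mem_append.1 hy with hy | hy
        · have := hub y hy; omega
        · simp at hy; omega

-- ===== VERDICT (by name: the statement is the Claim_ definition above) =====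
theorem fill_missing_page_numbers_py_spec : Claim_equal_fill_missing_page_numbers_py := by
  intro page_list gap _
  unfold Spec_fill_missing_page_numbers_py
  unfold fill_missing_page_numbers_py fill_missing_page_numbers_py_alt
  simp only []
  by_cases hall : ((page_list.filter (fun p => PySem.Str.strIsdigit p)).map
      (fun p => PySem.Int.ofStr? p)).all Option.isSome
  · rw [if_pos hall, if_pos hall]
    have hpwnums := PySem.List.sorted_ofList_pairwise_lt
      (xs := ((page_list.filter (fun p => PySem.Str.strIsdigit p)).map
        (fun p => PySem.Int.ofStr? p)).reduceOption)
    rcases hn : PySem.List.sorted (PySem.Set.ofList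
        (((page_list.filter (fun p => PySem.Str.strIsdigit p)).map
          (fun p => PySem.Int.ofStr? p)).reduceOption)) (fun x => x) false with _ | ⟨x, rest⟩
    · rfl
    · rw [hn] at hpwnums
      rw [if_neg (by simp), if_neg (by simp)]
      simp only [List.tail_cons, List.headI_cons]
      obtain ⟨heq, hpw⟩ := pvLoop_eq gap rest [] [x] [x] x x hpwnums
        (pvGetLast_append [] x) (by simp [PySem.List.min?]) (by simp [PySem.List.max?]) le_rfl
        (by simp [PySem.List.pyRange_one_singleton]) (by simp) (by simp)
      rw [PySem.List.foldl_append_eq_flatMap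
        (g := fun c => PySem.List.pyRange ((PySem.List.min? c (fun y => y)).getD 0)
          ((PySem.List.max? c (fun y => y)).getD 0 + 1) 1)]
      rw [List.nil_append]
      rw [show (fun c => PySem.List.pyRange ((PySem.List.min? c (fun y => y)).getD 0)
          ((PySem.List.max? c (fun y => y)).getD 0 + 1) 1) = pvFill from rfl]
      rw [heq]
      have hnd : ((rest.foldl (fun (st : List Int × Int) n =>
          if n - st.2 ≤ gap then (st.1 ++ PySem.List.pyRange (st.2 + 1) (n + 1) 1, n)
          else (st.1 ++ [n], n)) ([x], x)).1).Nodup := hpw.imp (fun h => ne_of_lt h)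
      rw [PySem.Set.ofList_eq_self_of_nodup _ hnd,
        PySem.List.sorted_eq_self_of_pairwise _ (fun y => y) (hpw.imp (fun h => le_of_lt h))]
  · rw [if_neg hall, if_neg hall]
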